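-- pv_equiv track=rewrite | github.com/TLMn00bs/advent-of-code | jartigag/2023-python3.11/day01/sol.py | part1
-- ===== SOURCE A (Python) =====
-- def part1(input: list) -> list:
--     nums = []
--     for i in input:
--         num = 0
--         num_str = "".join([c if c.isdigit() else "" for c in i])
--         if num_str.isdigit():
--             num = int(num_str[0])*10 + int(num_str[-1])
--         nums.append(num)
--     return nums
-- ===== SOURCE B (Python) =====
-- def part1(input: list) -> list:
--     nums = []
--     for i in input:
--         first = next((c for c in i if c.isdigit()), None)
--         if first is None:
--             nums.append(0)
--         else:
--             last = next(c for c in reversed(i) if c.isdigit())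
--             nums.append(int(first) * 10 + int(last))
--     return nums
-- ===== Notes on version B (the rewrite author's own statement) =====
-- stated objective: idiomatic
-- what changed: Instead of materializing the full digit-only string and indexing [0]/[-1], B finds the first digit by a forward generator scan and the last digit by a reverse scan, keeping only the two endpoint characters.
import Mathlib
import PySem

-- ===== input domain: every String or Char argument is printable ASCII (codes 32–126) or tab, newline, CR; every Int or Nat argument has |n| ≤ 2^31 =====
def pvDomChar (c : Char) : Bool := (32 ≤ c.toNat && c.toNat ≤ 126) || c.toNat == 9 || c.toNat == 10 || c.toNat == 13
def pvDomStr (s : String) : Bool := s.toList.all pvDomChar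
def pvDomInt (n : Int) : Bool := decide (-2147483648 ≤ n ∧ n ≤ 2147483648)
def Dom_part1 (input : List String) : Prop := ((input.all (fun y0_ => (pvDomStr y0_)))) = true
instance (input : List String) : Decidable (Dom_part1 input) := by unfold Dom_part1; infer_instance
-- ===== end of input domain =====

-- B finds the first digit by a forward scan and the last digit by a reverse scan,
-- instead of A's building of the full digit-only string and indexing it at [0] and [-1].

-- ===== PORT A =====
-- one loop body of A: join the digits of the line into num_str, then index it at 0 and -1
def part1LineA (i : String) : Int :=
  let numStr := PySem.Chars.join []
    ((i.toList).map (fun c => if PySem.Chars.isdigit c then [c] else []))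
  if PySem.Chars.strIsdigit numStr then
    (PySem.Int.ofChars? [PySem.List.pyGetD numStr 0 'a']).getD 0 * 10 +
      (PySem.Int.ofChars? [PySem.List.pyGetD numStr (-1) 'a']).getD 0
  else 0

def part1 (input : List String) : List Int :=
  input.foldl (fun nums i => nums ++ [part1LineA i]) []

-- ===== PORT B =====
-- one loop body of B: forward scan for the first digit, reverse scan for the last
def part1LineB (i : String) : Int :=
  match (i.toList).find? PySem.Chars.isdigit with
  | none => 0
  | some f =>
    match (i.toList.reverse).find? PySem.Chars.isdigit with
    | none => 0
    | some l => (PySem.Int.ofChars? [f]).getD 0 * 10 + (PySem.Int.ofChars? [l]).getD 0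

def part1_alt (input : List String) : List Int :=
  input.map part1LineB

-- ===== PRECONDITION & SPEC =====
def Spec_part1 (input : List String) (out : List Int) : Prop := out = part1_alt input
instance (input : List String) (out : List Int) : Decidable (Spec_part1 input out) := by unfold Spec_part1; infer_instance

-- ===== CLAIM (what is proved, stated in full; the proofs are below) =====
def Claim_equal_part1 : Prop := ∀ (input : List String), Dom_part1 input → Spec_part1 input (part1 input)

-- ===== LEMMAS AND PROOFS =====

-- "".join with the empty separator is concatenation
theorem join_nil_flatten (l : List (List Char)) : PySem.Chars.join [] l = l.flatten := by
  induction l with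
  | nil => rfl
  | cons a t ih =>
    cases t with
    | nil => simp [PySem.Chars.join, List.intercalate]
    | cons b t' =>
      simp only [PySem.Chars.join, List.intercalate] at *
      simp only [List.intersperse, List.flatten_cons] at *
      simp [ih]

-- A's "".join([c if c.isdigit() else "" for c in i]) is the digit filter of the line
theorem joinDigits_eq_filter (cs : List Char) :
    PySem.Chars.join [] (cs.map (fun c => if PySem.Chars.isdigit c then [c] else []))
      = cs.filter PySem.Chars.isdigit := by
  rw [join_nil_flatten]
  induction cs with
  | nil => rfl
  | cons c cs ih =>
    by_cases h : PySem.Chars.isdigit c <;> simp [h, ih]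

theorem lineA_eq_lineB (i : String) : part1LineA i = part1LineB i := by
  simp only [part1LineA, part1LineB, joinDigits_eq_filter]
  rcases hf : (i.toList).find? PySem.Chars.isdigit with _ | f
  · -- no digit: the filter is empty, strIsdigit is false
    have h0 : (i.toList).filter PySem.Chars.isdigit = [] := by
      simp only [List.filter_eq_nil_iff]
      intro c hc
      exact List.find?_eq_none.mp hf c hc
    simp [h0, PySem.Chars.strIsdigit]
  · -- a digit exists: the filter is nonempty and all digits
    have hne : (i.toList).filter PySem.Chars.isdigit ≠ [] := by
      intro h
      have : ((i.toList).filter PySem.Chars.isdigit).head? = some f := by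
        rw [List.head?_filter, hf]
      simp [h] at this
    have hdig : PySem.Chars.strIsdigit ((i.toList).filter PySem.Chars.isdigit) = true := by
      simp only [PySem.Chars.strIsdigit, Bool.and_eq_true, List.all_eq_true]
      refine ⟨by simpa using hne, fun c hc => (List.mem_filter.mp hc).2⟩
    rw [hdig, if_pos rfl]
    -- head of the filter is the forward find
    have hhead : PySem.List.pyGetD ((i.toList).filter PySem.Chars.isdigit) 0 'a' = f := by
      have h1 : ((i.toList).filter PySem.Chars.isdigit).head? = some f := by
        rw [List.head?_filter, hf]
      rcases hF : (i.toList).filter PySem.Chars.isdigit with _ | ⟨a, t⟩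
      · exact absurd hF hne
      · rw [hF] at h1
        simp only [List.head?_cons, Option.some.injEq] at h1
        rw [PySem.List.pyGetD_zero_cons, h1]
    rw [hhead]
    -- the reverse scan finds a digit, and it is the last element of the filter
    rcases hl : (i.toList.reverse).find? PySem.Chars.isdigit with _ | l
    · exfalso
      have h0 : (i.toList.reverse).filter PySem.Chars.isdigit = [] := by
        simp only [List.filter_eq_nil_iff]
        intro c hc
        exact List.find?_eq_none.mp hl c hc
      rw [List.filter_reverse] at h0
      exact hne (by simpa using h0)
    · have h2 : ((i.toList).filter PySem.Chars.isdigit).getLast? = some l := by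
        rw [← List.head?_reverse, ← List.filter_reverse, List.head?_filter, hl]
      have hlast : PySem.List.pyGetD ((i.toList).filter PySem.Chars.isdigit) (-1) 'a' = l := by
        rw [PySem.List.pyGetD_neg_one _ _ hne]
        rw [List.getLast?_eq_some_getLast hne] at h2
        exact Option.some.inj h2
      rw [hlast]

-- ===== VERDICT (by name: the statement is the Claim_ definition above) =====
theorem part1_spec : Claim_equal_part1 := by
  intro input _
  unfold Spec_part1 part1 part1_alt
  rw [PySem.List.foldl_append_singleton_eq_map]
  exact List.map_congr_left (fun i _ => lineA_eq_lineB i)
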